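-- pv_equiv track=rewrite | github.com/HTaeha/Algorithm_study | Hong/Kakao/2018_Kakao/soon_that_song.py | solution
-- ===== SOURCE A (Python) =====
-- def solution(m, musicinfos):
--     answer = []
--
--     melody = {'C#' : 1, 'D#' : 2, 'F#' : 3, 'G#' : 4, 'A#' : 5}
--     song_dic = dict()
--     for key, val in melody.items():
--         m = m.replace(key, str(val))
--
--     for i, data in enumerate(musicinfos):
--         split_data = data.split(',')
--         t1, t2, name, mel = split_data
--         for key, val in melody.items():
--             mel = mel.replace(key, str(val))
--         t = calc_time(t1, t2)
--         mel2 = ""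
--         if len(mel) <= t:
--             for i2 in range(t):
--                 mel2 += mel[i2%len(mel)]
--         else:
--             mel2 = mel[:t]
--
--         song_dic[name] = [t, mel2, i+1]
--
--     for key, val in song_dic.items():
--         if m in val[1]:
--             answer.append([key, val])
--
--     if len(answer) == 0:
--         return '(None)'
--
--     temp_ans = sorted(answer, key = (lambda x:x[1][2]))
--     temp_ans = sorted(temp_ans, key = (lambda x:x[1][0]), reverse = True)
--     answer = temp_ans[0][0]
--
--     return answer
--
-- def calc_time(t1, t2):
--     temp_t1 = t1.split(':')
--     temp_t2 = t2.split(':')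
--     result = int(temp_t2[0])*60 + int(temp_t2[1]) - (int(temp_t1[0])*60 + int(temp_t1[1]))
--
--     return result
-- ===== SOURCE B (Python) =====
-- def solution(m, musicinfos):
--     notes = {'C#': '1', 'D#': '2', 'F#': '3', 'G#': '4', 'A#': '5'}
--
--     def flat(s):
--         for k, v in notes.items():
--             s = s.replace(k, v)
--         return s
--
--     def minutes(t):
--         h, mm = t.split(':')[:2]
--         return int(h) * 60 + int(mm)
--
--     m = flat(m)
--     songs = {}
--     for order, info in enumerate(musicinfos, 1):
--         t1, t2, name, mel = info.split(',')
--         dur = minutes(t2) - minutes(t1)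
--         mel = flat(mel)
--         played = mel[:dur] if dur <= len(mel) else (mel * (dur // len(mel) + 1))[:dur]
--         songs[name] = (dur, played, order)
--
--     best = None  # (dur, order, name)
--     for name, (dur, played, order) in songs.items():
--         if m in played:
--             if best is None or dur > best[0] or (dur == best[0] and order < best[1]):
--                 best = (dur, order, name)
--     return best[2] if best else '(None)'
-- ===== Notes on version B (the rewrite author's own statement) =====
-- stated objective: simpler
-- what changed: B replaces A's collect-matches-then-two-stable-sorts selection with a single best-candidate fold over the song dict (strict duration/order comparisons reproduce the longest-duration, earliest-order tie-break), and builds each played melody by slicing a repeated string instead of a character-by-character modulo loop.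
import Mathlib
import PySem

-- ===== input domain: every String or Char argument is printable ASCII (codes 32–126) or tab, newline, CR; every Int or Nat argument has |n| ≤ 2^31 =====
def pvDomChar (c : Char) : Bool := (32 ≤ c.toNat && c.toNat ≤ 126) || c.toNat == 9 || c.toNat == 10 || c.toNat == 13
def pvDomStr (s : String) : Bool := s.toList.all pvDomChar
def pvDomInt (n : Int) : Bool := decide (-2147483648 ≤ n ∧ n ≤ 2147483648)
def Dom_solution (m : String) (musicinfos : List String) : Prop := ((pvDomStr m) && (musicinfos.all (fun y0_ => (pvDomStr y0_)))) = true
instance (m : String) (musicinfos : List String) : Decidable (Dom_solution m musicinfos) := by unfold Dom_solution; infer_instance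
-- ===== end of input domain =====

-- B replaces A's collect-matches-then-two-stable-sorts selection by a single best-candidate
-- fold over the song dict, and builds each played melody by slicing a repeated string instead
-- of a character-by-character modulo loop (objective: simpler).

-- song-dict entry: name ↦ (duration, played melody, 1-based position)
abbrev pvE : Type := List Char × Int × List Char × Int

-- ===== PORT A =====
-- melody = {'C#':1, 'D#':2, 'F#':3, 'G#':4, 'A#':5}
def pvMel : List (List Char × Int) :=
  [(['C','#'], 1), (['D','#'], 2), (['F','#'], 3), (['G','#'], 4), (['A','#'], 5)]

-- 'for key, val in melody.items(): s = s.replace(key, str(val))'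
def pvTranslate (s : List Char) : List Char :=
  pvMel.foldl (fun s kv => PySem.Chars.replace s kv.1 (PySem.Int.toChars kv.2)) s

-- calc_time(t1, t2); the int() calls and [0]/[1] indexing are guarded with getD:
-- Pre_solution excludes exactly the inputs where Python raises there
def pvCalcTime (t1 t2 : List Char) : Int :=
  let p1 := PySem.Chars.splitOn t1 [':']
  let p2 := PySem.Chars.splitOn t2 [':']
  (PySem.Int.ofChars? (p2.getD 0 [])).getD 0 * 60 + (PySem.Int.ofChars? (p2.getD 1 [])).getD 0
    - ((PySem.Int.ofChars? (p1.getD 0 [])).getD 0 * 60 + (PySem.Int.ofChars? (p1.getD 1 [])).getD 0)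

-- the body of A's 'for i, data in enumerate(musicinfos):' loop (p = (i, data))
def pvStepA (d : PySem.Dict (List Char) (Int × List Char × Int)) (p : Int × List Char) :
    PySem.Dict (List Char) (Int × List Char × Int) :=
  let sd := PySem.Chars.splitOn p.2 [',']
  -- 't1, t2, name, mel = split_data' (exactly 4 parts: Pre_); then mel is note-replaced
  let mel := pvTranslate (sd.getD 3 [])
  let t := pvCalcTime (sd.getD 0 []) (sd.getD 1 [])
  let mel2 : List Char :=
    if (mel.length : Int) ≤ t then
      -- 'for i2 in range(t): mel2 += mel[i2 % len(mel)]' (len(mel) = 0 with t > 0 is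
      -- Python's ZeroDivisionError, excluded by Pre_; the index is then always in range)
      (PySem.List.pyRange 0 t 1).foldl
        (fun acc i2 => acc ++ [PySem.List.pyGetD mel (PySem.Int.mod i2 (mel.length : Int)) ' ']) []
    else PySem.List.slice mel none (some t)
  d.insert (sd.getD 2 []) (t, mel2, p.1 + 1)

def solution (m : String) (musicinfos : List String) : String :=
  let m' := pvTranslate m.toList
  let song_dic := (PySem.List.enumerate (musicinfos.map String.toList)).foldl pvStepA PySem.Dict.empty
  let answer : List pvE :=
    song_dic.items.foldl (fun acc kv => if PySem.Chars.isIn m' kv.2.2.1 = true then acc ++ [kv] else acc) []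
  if answer.length = 0 then "(None)"
  else
    let ta := PySem.List.sorted answer (fun x => x.2.2.2)
    let ta2 := PySem.List.sorted ta (fun x => x.2.1) true
    String.ofList ((ta2.headD ([], 0, [], 0)).1)   -- temp_ans[0][0] (nonempty here: guard default)

-- ===== PORT B =====
-- notes = {'C#':'1', 'D#':'2', 'F#':'3', 'G#':'4', 'A#':'5'}
def pvNotes : List (List Char × List Char) :=
  [(['C','#'], ['1']), (['D','#'], ['2']), (['F','#'], ['3']), (['G','#'], ['4']), (['A','#'], ['5'])]

def pvFlat (s : List Char) : List Char :=
  pvNotes.foldl (fun s kv => PySem.Chars.replace s kv.1 kv.2) s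

-- minutes(t): 'h, mm = t.split(':')[:2]' (two parts required: Pre_), then int(h)*60 + int(mm)
def pvMinutes (t : List Char) : Int :=
  let ps := (PySem.Chars.splitOn t [':']).take 2
  (PySem.Int.ofChars? (ps.getD 0 [])).getD 0 * 60 + (PySem.Int.ofChars? (ps.getD 1 [])).getD 0

-- the body of B's 'for order, info in enumerate(musicinfos, 1):' loop (p = (order, info))
def pvStepB (d : PySem.Dict (List Char) (Int × List Char × Int)) (p : Int × List Char) :
    PySem.Dict (List Char) (Int × List Char × Int) :=
  let sd := PySem.Chars.splitOn p.2 [',']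
  let dur := pvMinutes (sd.getD 1 []) - pvMinutes (sd.getD 0 [])
  let mel := pvFlat (sd.getD 3 [])
  -- played = mel[:dur] if dur <= len(mel) else (mel * (dur // len(mel) + 1))[:dur]
  let played : List Char :=
    if dur ≤ (mel.length : Int) then PySem.List.slice mel none (some dur)
    else PySem.List.slice (PySem.List.pyRepeat mel (PySem.Int.floordiv dur (mel.length : Int) + 1))
           none (some dur)
  d.insert (sd.getD 2 []) (dur, played, p.1)

-- 'if best is None or dur > best[0] or (dur == best[0] and order < best[1]): best = (dur, order, name)'
def pvSel (best : Option (Int × Int × List Char)) (kv : pvE) : Option (Int × Int × List Char) :=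
  match best with
  | none => some (kv.2.1, kv.2.2.2, kv.1)
  | some b =>
    if kv.2.1 > b.1 ∨ (kv.2.1 = b.1 ∧ kv.2.2.2 < b.2.1) then some (kv.2.1, kv.2.2.2, kv.1)
    else some b

def solution_alt (m : String) (musicinfos : List String) : String :=
  let m' := pvFlat m.toList
  let songs := (PySem.List.enumerate (musicinfos.map String.toList) 1).foldl pvStepB PySem.Dict.empty
  let best := songs.items.foldl
    (fun best kv => if PySem.Chars.isIn m' kv.2.2.1 = true then pvSel best kv else best) none
  match best with
  | none => "(None)"
  | some b => String.ofList b.2.2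

-- ===== PRECONDITION & SPEC =====
-- 't.split(':')' must yield two int()-parsable leading fields (else Python raises
-- IndexError/ValueError in calc_time)
def pvTimeOk (t : List Char) : Bool :=
  decide (2 ≤ (PySem.Chars.splitOn t [':']).length) &&
  (PySem.Int.ofChars? ((PySem.Chars.splitOn t [':']).getD 0 [])).isSome &&
  (PySem.Int.ofChars? ((PySem.Chars.splitOn t [':']).getD 1 [])).isSome

def pvPreItem (cs : List Char) : Prop :=
  (PySem.Chars.splitOn cs [',']).length = 4 ∧
  pvTimeOk ((PySem.Chars.splitOn cs [',']).getD 0 []) = true ∧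
  pvTimeOk ((PySem.Chars.splitOn cs [',']).getD 1 []) = true ∧
  (pvTranslate ((PySem.Chars.splitOn cs [',']).getD 3 []) ≠ [] ∨
    pvCalcTime ((PySem.Chars.splitOn cs [',']).getD 0 [])
               ((PySem.Chars.splitOn cs [',']).getD 1 []) ≤ 0)

-- Pre_solution holds exactly where A returns: each record splits into exactly 4
-- comma-fields (else the tuple unpack raises ValueError), both times parse (else
-- IndexError/ValueError in calc_time), and the note-substituted melody is not empty
-- when the duration is positive (else 'i2 % len(mel)' raises ZeroDivisionError).
def Pre_solution (m : String) (musicinfos : List String) : Prop :=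
  ∀ s ∈ musicinfos, pvPreItem s.toList

instance (m : String) (musicinfos : List String) : Decidable (Pre_solution m musicinfos) := by
  unfold Pre_solution pvPreItem; infer_instance

def pvWitness_solution : String × List String := ("ABC", ["10:00,10:03,HELLO,ABCDE"])

def Spec_solution (m : String) (musicinfos : List String) (out : String) : Prop := out = solution_alt m musicinfos
instance (m : String) (musicinfos : List String) (out : String) : Decidable (Spec_solution m musicinfos out) := by unfold Spec_solution; infer_instance

-- ===== CLAIM (what is proved, stated in full; the proofs are below) =====
def Claim_equal_solution : Prop := ∀ (m : String) (musicinfos : List String), Dom_solution m musicinfos → Pre_solution m musicinfos → Spec_solution m musicinfos (solution m musicinfos)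

-- ===== LEMMAS AND PROOFS =====


-- B's note substitution is A's (str(v) is the literal digit)
theorem pvFlat_eq (s : List Char) : pvFlat s = pvTranslate s := rfl

-- B's duration is A's calc_time
theorem pvMinutes_eq (t1 t2 : List Char) : pvMinutes t2 - pvMinutes t1 = pvCalcTime t1 t2 := by
  simp [pvMinutes, pvCalcTime, List.getD_eq_getElem?_getD, List.getElem?_take_of_lt]

-- getElem of a repeated list cycles
theorem pvRepeat_getD (mel : List Char) :
    ∀ (q k : Nat), k < q * mel.length →
      ((List.replicate q mel).flatten).getD k ' ' = mel.getD (k % mel.length) ' ' := by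
  intro q
  induction q with
  | zero => intro k hk; rw [Nat.zero_mul] at hk; omega
  | succ q ih =>
    intro k hk
    rw [Nat.succ_mul] at hk
    rw [List.replicate_succ, List.flatten_cons]
    by_cases hlt : k < mel.length
    · rw [List.getD_append _ _ _ _ hlt, Nat.mod_eq_of_lt hlt]
    · have hge : mel.length ≤ k := le_of_not_gt hlt
      rw [List.getD_append_right _ _ _ _ hge, ih (k - mel.length) (by omega),
        ← Nat.mod_eq_sub_mod hge]

-- A's modulo loop is a map over range(t)
theorem pvLoop_eq_map (mel : List Char) (t : Int) :
    (PySem.List.pyRange 0 t 1).foldl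
      (fun acc i2 => acc ++ [PySem.List.pyGetD mel (PySem.Int.mod i2 (mel.length : Int)) ' ']) []
      = (List.range t.toNat).map (fun k => mel.getD (k % mel.length) ' ') := by
  rw [PySem.List.foldl_append_singleton_eq_map, PySem.List.pyRange_one, List.map_map]
  simp only [List.nil_append, Int.sub_zero]
  apply List.map_congr_left
  intro k hk
  simp only [Function.comp_apply]
  rw [show (0 : Int) + (k : Int) = (k : Int) by ring, PySem.Int.mod_natCast,
    PySem.List.pyGetD_natCast]

-- B's repeat-and-slice expansion is A's modulo loop / slice, wherever A returns
theorem pvExpand_eq (mel : List Char) (t : Int) (h : mel ≠ [] ∨ t ≤ 0) :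
    (if (mel.length : Int) ≤ t then
      (PySem.List.pyRange 0 t 1).foldl
        (fun acc i2 => acc ++ [PySem.List.pyGetD mel (PySem.Int.mod i2 (mel.length : Int)) ' ']) []
     else PySem.List.slice mel none (some t))
    = (if t ≤ (mel.length : Int) then PySem.List.slice mel none (some t)
       else PySem.List.slice (PySem.List.pyRepeat mel (PySem.Int.floordiv t (mel.length : Int) + 1))
              none (some t)) := by
  by_cases h1 : (mel.length : Int) ≤ t
  · have ht : 0 ≤ t := le_trans (by positivity) h1
    by_cases h2 : t ≤ (mel.length : Int)
    · -- t = len(mel): the loop reproduces mel, and so does the slice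
      have htl : t = (mel.length : Int) := le_antisymm h2 h1
      rw [if_pos h1, if_pos h2, pvLoop_eq_map mel t, htl]
      have hslice : PySem.List.slice mel none (some (mel.length : Int)) = mel := by
        simp only [PySem.List.slice, PySem.List.clampIdx]
        rw [if_neg (by omega)]
        simp
      rw [hslice]
      apply List.ext_getElem
      · simp
      · intro i hi1 hi2
        simp only [List.getElem_map, List.getElem_range]
        have hi : i < mel.length := by simpa using hi2
        rw [Nat.mod_eq_of_lt hi, List.getD_eq_getElem _ _ hi]
    · -- len(mel) < t: the loop cycles; B slices a sufficient repetition
      have hlen : (mel.length : Int) < t := lt_of_not_ge h2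
      have hnil : mel ≠ [] := by
        rcases h with h | h
        · exact h
        · exfalso; omega
      have hn : 0 < mel.length := List.length_pos_iff.mpr hnil
      have hnz : (0 : Int) < (mel.length : Int) := by exact_mod_cast hn
      rw [if_pos h1, if_neg h2, pvLoop_eq_map mel t,
        PySem.Int.floordiv_eq_ediv_of_pos hnz]
      set q : Int := t / (mel.length : Int) + 1 with hqdef
      have hq0 : 0 ≤ t / (mel.length : Int) := Int.ediv_nonneg ht hnz.le
      have hq : 0 < q := by omega
      have hlt : t < q * (mel.length : Int) := Int.lt_ediv_add_one_mul_self t hnz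
      have hL : (PySem.List.pyRepeat mel q).length = q.toNat * mel.length := by
        simp [PySem.List.pyRepeat, List.length_flatten, List.map_replicate,
          List.sum_replicate, smul_eq_mul]
      have hkey : t.toNat ≤ q.toNat * mel.length := by
        have h2' : ((t.toNat : Nat) : Int) ≤ ((q.toNat * mel.length : Nat) : Int) := by
          push_cast
          rw [Int.toNat_of_nonneg ht, Int.toNat_of_nonneg hq.le]
          exact hlt.le
        exact_mod_cast h2'
      have hslice : PySem.List.slice (PySem.List.pyRepeat mel q) none (some t)
          = (PySem.List.pyRepeat mel q).take t.toNat := by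
        simp only [PySem.List.slice, PySem.List.clampIdx]
        rw [if_neg (by omega), List.drop_zero]
        have hmin : min t.toNat (PySem.List.pyRepeat mel q).length = t.toNat := by
          rw [hL]; exact Nat.min_eq_left hkey
        simp [hmin]
      rw [hslice]
      apply List.ext_getElem
      · simp only [List.length_map, List.length_range, List.length_take, hL]
        exact (Nat.min_eq_left hkey).symm
      · intro i hi1 hi2
        have hit : i < t.toNat := by simpa using hi1
        simp only [List.getElem_map, List.getElem_range]
        rw [List.getElem_take]
        have hiq : i < q.toNat * mel.length := by omega
        have hrep := pvRepeat_getD mel q.toNat i hiq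
        have hlen2 : i < (PySem.List.pyRepeat mel q).length := by rw [hL]; omega
        rw [← List.getD_eq_getElem _ ' ' hlen2]
        simpa [PySem.List.pyRepeat] using hrep.symm
  · -- t < len(mel): both take the plain slice
    rw [if_neg h1, if_pos (by omega : t ≤ (mel.length : Int))]

-- A's and B's per-song dict updates agree on records Pre_ admits
theorem pvStep_eq (d : PySem.Dict (List Char) (Int × List Char × Int)) (i : Int)
    (cs : List Char) (h : pvPreItem cs) : pvStepA d (i, cs) = pvStepB d (i + 1, cs) := by
  obtain ⟨h4, ht1, ht2, hmel⟩ := h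
  simp only [pvStepA, pvStepB, pvFlat_eq, pvMinutes_eq]
  rw [← pvExpand_eq _ _ hmel]

-- A's and B's song dicts are equal
theorem pvDicts_eq : ∀ (xs : List String) (i j : Int), j = i + 1 → (∀ s ∈ xs, pvPreItem s.toList) →
    (PySem.List.enumerate (xs.map String.toList) i).foldl pvStepA PySem.Dict.empty
      = (PySem.List.enumerate (xs.map String.toList) j).foldl pvStepB PySem.Dict.empty := by
  suffices hgen : ∀ (xs : List String) (i j : Int), j = i + 1 → (∀ s ∈ xs, pvPreItem s.toList) →
      ∀ d, (PySem.List.enumerate (xs.map String.toList) i).foldl pvStepA d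
        = (PySem.List.enumerate (xs.map String.toList) j).foldl pvStepB d by
    intro xs i j hj hpre; exact hgen xs i j hj hpre _
  intro xs
  induction xs with
  | nil => intro i j hj hpre d; rfl
  | cons x xs ih =>
    intro i j hj hpre d
    rw [List.map_cons, PySem.List.enumerate_cons, PySem.List.enumerate_cons,
      List.foldl_cons, List.foldl_cons]
    rw [hj, pvStep_eq d i x.toList (hpre x List.mem_cons_self)]
    exact ih (i+1) (i+1+1) rfl (fun s hs => hpre s (List.mem_cons_of_mem _ hs)) _

-- ordering helpers for the selection proofs
def pvG (b x : pvE) : pvE := if b.2.1 < x.2.1 then x else b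

def pvOrdsOK (d : PySem.Dict (List Char) (Int × List Char × Int)) : Prop :=
  (d.items.map (fun kv => kv.2.2.2)).Pairwise (· ≠ ·)

-- head of A's reverse duration sort: running strict max over the order-sorted list
theorem pvFoldIns_head (l : List pvE) : ∀ (h0 : pvE) (t0 : List pvE) (d : pvE),
    ((l.foldl (fun acc x => PySem.List.insertBy (fun a b => decide (b.2.1 < a.2.1)) x acc) (h0 :: t0)).headD d)
      = l.foldl pvG h0 := by
  induction l with
  | nil => intro h0 t0 d; rfl
  | cons x xs ih =>
    intro h0 t0 d
    simp only [List.foldl_cons]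
    by_cases hx : h0.2.1 < x.2.1
    · have hins : PySem.List.insertBy (fun a b => decide (b.2.1 < a.2.1)) x (h0 :: t0)
          = x :: h0 :: t0 := by simp [PySem.List.insertBy, hx]
      rw [hins, ih, show pvG h0 x = x from by simp [pvG, hx]]
    · have hins : PySem.List.insertBy (fun a b => decide (b.2.1 < a.2.1)) x (h0 :: t0)
          = h0 :: PySem.List.insertBy (fun a b => decide (b.2.1 < a.2.1)) x t0 := by
        simp [PySem.List.insertBy, hx]
      rw [hins, ih, show pvG h0 x = h0 from by simp [pvG, hx]]

-- the running strict max over an order-sorted list is the duration-max with least order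
theorem pvFoldG_spec : ∀ (l : List pvE) (b : pvE),
    l.Pairwise (fun a c => a.2.2.2 ≤ c.2.2.2) → (∀ y ∈ l, b.2.2.2 ≤ y.2.2.2) →
    (l.foldl pvG b = b ∨ l.foldl pvG b ∈ l) ∧
    b.2.1 ≤ (l.foldl pvG b).2.1 ∧
    (b.2.1 = (l.foldl pvG b).2.1 → (l.foldl pvG b).2.2.2 ≤ b.2.2.2) ∧
    (∀ y ∈ l, y.2.1 ≤ (l.foldl pvG b).2.1 ∧
      (y.2.1 = (l.foldl pvG b).2.1 → (l.foldl pvG b).2.2.2 ≤ y.2.2.2)) := by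
  intro l
  induction l with
  | nil => intro b _ _; simp
  | cons x xs ih =>
    intro b hp hb
    obtain ⟨hx, hp'⟩ := List.pairwise_cons.mp hp
    have hbx : b.2.2.2 ≤ x.2.2.2 := hb x List.mem_cons_self
    have hb' : ∀ y ∈ xs, (pvG b x).2.2.2 ≤ y.2.2.2 := by
      intro y hy
      by_cases hc : b.2.1 < x.2.1
      · simpa [pvG, hc] using hx y hy
      · simpa [pvG, hc] using hb y (List.mem_cons_of_mem _ hy)
    obtain ⟨hmem, hle, heq, hall⟩ := ih (pvG b x) hp' hb'
    simp only [List.foldl_cons]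
    by_cases hc : b.2.1 < x.2.1
    · have hgx : pvG b x = x := by simp [pvG, hc]
      rw [hgx] at hmem hle heq hall ⊢
      refine ⟨?_, by omega, by intro hbe; omega, ?_⟩
      · rcases hmem with h | h
        · exact Or.inr (by rw [h]; exact List.mem_cons_self)
        · exact Or.inr (List.mem_cons_of_mem _ h)
      · intro y hy
        rcases List.mem_cons.mp hy with rfl | hy'
        · exact ⟨hle, heq⟩
        · exact hall y hy'
    · have hgx : pvG b x = b := by simp [pvG, hc]
      rw [hgx] at hmem hle heq hall ⊢
      refine ⟨?_, hle, heq, ?_⟩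
      · rcases hmem with h | h
        · exact Or.inl h
        · exact Or.inr (List.mem_cons_of_mem _ h)
      · intro y hy
        rcases List.mem_cons.mp hy with rfl | hy'
        · refine ⟨by omega, fun hye => ?_⟩
          have hbr : b.2.1 = (xs.foldl pvG b).2.1 := by omega
          have := heq hbr
          omega
        · exact hall y hy'

-- B's best-candidate fold selects the duration-max with least order
theorem pvSelFold_spec : ∀ (l : List pvE) (v : Int × Int × List Char),
    ∃ r, l.foldl pvSel (some v) = some r ∧
      (r = v ∨ ∃ e ∈ l, r = (e.2.1, e.2.2.2, e.1)) ∧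
      v.1 ≤ r.1 ∧ (v.1 = r.1 → r.2.1 ≤ v.2.1) ∧
      (∀ y ∈ l, y.2.1 ≤ r.1 ∧ (y.2.1 = r.1 → r.2.1 ≤ y.2.2.2)) := by
  intro l
  induction l with
  | nil => intro v; exact ⟨v, rfl, Or.inl rfl, le_refl _, fun _ => le_refl _, by simp⟩
  | cons x xs ih =>
    intro v
    simp only [List.foldl_cons]
    by_cases hc : x.2.1 > v.1 ∨ (x.2.1 = v.1 ∧ x.2.2.2 < v.2.1)
    · have hstep : pvSel (some v) x = some (x.2.1, x.2.2.2, x.1) := by simp [pvSel, hc]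
      rw [hstep]
      obtain ⟨r, hfold, hmem, hle, heq, hall⟩ := ih (x.2.1, x.2.2.2, x.1)
      simp only at hle heq
      refine ⟨r, hfold, ?_, ?_, ?_, ?_⟩
      · rcases hmem with h | ⟨e, he, hre⟩
        · exact Or.inr ⟨x, List.mem_cons_self, h⟩
        · exact Or.inr ⟨e, List.mem_cons_of_mem _ he, hre⟩
      · rcases hc with h | ⟨he, ho⟩ <;> omega
      · intro hve
        rcases hc with h | ⟨he, ho⟩
        · omega
        · have := heq (by omega)
          omega
      · intro y hy
        rcases List.mem_cons.mp hy with rfl | hy'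
        · exact ⟨hle, heq⟩
        · exact hall y hy'
    · have hstep : pvSel (some v) x = some v := by simp [pvSel, hc]
      rw [hstep]
      obtain ⟨r, hfold, hmem, hle, heq, hall⟩ := ih v
      push_neg at hc
      obtain ⟨hc1, hc2⟩ := hc
      refine ⟨r, hfold, ?_, hle, heq, ?_⟩
      · rcases hmem with h | ⟨e, he, hre⟩
        · exact Or.inl h
        · exact Or.inr ⟨e, List.mem_cons_of_mem _ he, hre⟩
      · intro y hy
        rcases List.mem_cons.mp hy with rfl | hy'
        · refine ⟨by omega, fun hyr => ?_⟩
          have hveq : y.2.1 = v.1 := by omega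
          have hord := hc2 hveq
          have := heq (by omega)
          omega
        · exact hall y hy'

-- distinct order stamps identify entries
theorem pvOrd_inj : ∀ (l : List pvE), l.Pairwise (fun a c => a.2.2.2 ≠ c.2.2.2) →
    ∀ a ∈ l, ∀ c ∈ l, a.2.2.2 = c.2.2.2 → a = c := by
  intro l
  induction l with
  | nil => simp
  | cons x xs ih =>
    intro hp a ha c hc hac
    obtain ⟨hx, hp'⟩ := List.pairwise_cons.mp hp
    rcases List.mem_cons.mp ha with rfl | ha' <;> rcases List.mem_cons.mp hc with rfl | hc'
    · rfl
    · exact absurd hac (hx c hc')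
    · exact absurd hac.symm (hx a ha')
    · exact ih hp' a ha' c hc' hac

-- one dict insert with a fresh, larger order stamp keeps keys nodup and order stamps distinct
theorem pvInsert_inv (d : PySem.Dict (List Char) (Int × List Char × Int))
    (hk : d.keys.Nodup) (s : Int) (hb : ∀ kv ∈ d.items, kv.2.2.2 ≤ s) (hp : pvOrdsOK d)
    (K : List Char) (t : Int) (mel2 : List Char) :
    (d.insert K (t, mel2, s + 1)).keys.Nodup ∧
    (∀ kv ∈ (d.insert K (t, mel2, s + 1)).items, kv.2.2.2 ≤ s + 1) ∧
    pvOrdsOK (d.insert K (t, mel2, s + 1)) := by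
  by_cases hc : d.contains K = true
  · unfold PySem.Dict.insert
    rw [if_pos hc]
    have hkeys : (List.map (fun p => if (p.1 == K) = true then (K, (t, mel2, s+1)) else p) d.items).map
        (fun p => p.1) = d.items.map (fun p => p.1) := by
      rw [List.map_map]
      apply List.map_congr_left
      intro p _
      simp only [Function.comp_apply]
      by_cases hpk : (p.1 == K) = true
      · rw [if_pos hpk]
        exact (beq_iff_eq.mp hpk).symm
      · rw [if_neg hpk]
    refine ⟨?_, ?_, ?_⟩
    · show (List.map (fun p => if (p.1 == K) = true then (K, (t, mel2, s+1)) else p) d.items).map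
        (fun p => p.1) |>.Nodup
      rw [hkeys]
      exact hk
    · intro kv hkv
      obtain ⟨p, hpmem, hpe⟩ := List.mem_map.mp hkv
      by_cases hpk : (p.1 == K) = true
      · rw [if_pos hpk] at hpe
        rw [← hpe]
      · rw [if_neg hpk] at hpe
        rw [← hpe]
        have := hb p hpmem
        omega
    · unfold pvOrdsOK
      show (List.map (fun p => if (p.1 == K) = true then (K, (t, mel2, s+1)) else p) d.items).map
        (fun kv => kv.2.2.2) |>.Pairwise (· ≠ ·)
      rw [List.map_map]
      rw [List.pairwise_map]
      have hkp : d.items.Pairwise (fun p q => p.1 ≠ q.1) := by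
        have hk' : (d.items.map (fun p => p.1)).Nodup := hk
        exact List.pairwise_map.mp hk'
      have hop : d.items.Pairwise (fun p q => p.2.2.2 ≠ q.2.2.2) := by
        unfold pvOrdsOK at hp
        exact List.pairwise_map.mp hp
      refine List.Pairwise.imp_of_mem ?_ (hkp.and hop)
      intro p q hpm hqm hpq
      obtain ⟨hne, hone⟩ := hpq
      have hbp := hb p hpm
      have hbq := hb q hqm
      simp only [Function.comp_apply]
      by_cases h1 : (p.1 == K) = true <;> by_cases h2 : (q.1 == K) = true
      · exact absurd ((beq_iff_eq.mp h1).trans (beq_iff_eq.mp h2).symm) hne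
      · rw [if_pos h1, if_neg h2]
        show s + 1 ≠ q.2.2.2
        omega
      · rw [if_neg h1, if_pos h2]
        show p.2.2.2 ≠ s + 1
        omega
      · rw [if_neg h1, if_neg h2]
        exact hone
  · unfold PySem.Dict.insert
    rw [if_neg hc]
    have hc' : ∀ p ∈ d.items, p.1 ≠ K := by
      intro p hpm he
      apply hc
      simp only [PySem.Dict.contains, List.any_eq_true]
      exact ⟨p, hpm, by simp [he]⟩
    refine ⟨?_, ?_, ?_⟩
    · show ((d.items ++ [(K, (t, mel2, s+1))]).map (fun p => p.1)).Nodup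
      rw [List.map_append]
      rw [List.nodup_append]
      refine ⟨hk, by simp, ?_⟩
      intro a ha b hbm hab
      obtain ⟨p, hpm, hpe⟩ := List.mem_map.mp ha
      obtain ⟨p2, hpm2, hpe2⟩ := List.mem_map.mp hbm
      rw [List.mem_singleton] at hpm2
      subst hpm2
      exact hc' p hpm (by rw [hpe, hab]; exact hpe2.symm)
    · intro kv hkv
      rcases List.mem_append.mp hkv with hmem | hmem
      · have := hb kv hmem; omega
      · rw [List.mem_singleton] at hmem
        rw [hmem]
    · unfold pvOrdsOK
      show ((d.items ++ [(K, (t, mel2, s+1))]).map (fun kv => kv.2.2.2)).Pairwise (· ≠ ·)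
      rw [List.map_append, List.pairwise_append]
      refine ⟨hp, by simp, ?_⟩
      intro a ha b hbm
      simp only [List.map_cons, List.map_nil, List.mem_singleton] at hbm
      obtain ⟨p, hpm, hpe⟩ := List.mem_map.mp ha
      have := hb p hpm
      rw [hbm, ← hpe]
      omega

-- the song dict's order stamps are pairwise distinct
theorem pvDictA_inv : ∀ (xs : List (List Char)) (s : Int)
    (d : PySem.Dict (List Char) (Int × List Char × Int)),
    d.keys.Nodup → (∀ kv ∈ d.items, kv.2.2.2 ≤ s) → pvOrdsOK d →
    ((PySem.List.enumerate xs s).foldl pvStepA d).keys.Nodup ∧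
    pvOrdsOK ((PySem.List.enumerate xs s).foldl pvStepA d) := by
  intro xs
  induction xs with
  | nil =>
    intro s d h1 h2 h3
    exact ⟨h1, h3⟩
  | cons x xs ih =>
    intro s d h1 h2 h3
    rw [PySem.List.enumerate_cons, List.foldl_cons]
    have hstep : pvStepA d (s, x) = d.insert ((PySem.Chars.splitOn x [',']).getD 2 [])
        (pvCalcTime ((PySem.Chars.splitOn x [',']).getD 0 []) ((PySem.Chars.splitOn x [',']).getD 1 []),
         (if ((pvTranslate ((PySem.Chars.splitOn x [',']).getD 3 [])).length : Int) ≤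
              pvCalcTime ((PySem.Chars.splitOn x [',']).getD 0 []) ((PySem.Chars.splitOn x [',']).getD 1 []) then
            (PySem.List.pyRange 0 (pvCalcTime ((PySem.Chars.splitOn x [',']).getD 0 []) ((PySem.Chars.splitOn x [',']).getD 1 [])) 1).foldl
              (fun acc i2 => acc ++ [PySem.List.pyGetD (pvTranslate ((PySem.Chars.splitOn x [',']).getD 3 []))
                (PySem.Int.mod i2 ((pvTranslate ((PySem.Chars.splitOn x [',']).getD 3 [])).length : Int)) ' ']) []
          else PySem.List.slice (pvTranslate ((PySem.Chars.splitOn x [',']).getD 3 [])) none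
            (some (pvCalcTime ((PySem.Chars.splitOn x [',']).getD 0 []) ((PySem.Chars.splitOn x [',']).getD 1 [])))),
         s + 1) := rfl
    rw [hstep]
    obtain ⟨k1, k2, k3⟩ := pvInsert_inv d h1 s h2 h3 _ _ _
    exact ih (s + 1) _ k1 k2 k3

-- ===== VERDICT (by name: the statement is the Claim_ definition above) =====
set_option maxHeartbeats 1000000 in
theorem solution_spec : Claim_equal_solution := by
  intro m musicinfos hdom hpre
  unfold Spec_solution
  show solution m musicinfos = solution_alt m musicinfos
  unfold solution solution_alt
  rw [← pvDicts_eq musicinfos 0 1 rfl (fun s hs => hpre s hs)]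
  set D := (PySem.List.enumerate (musicinfos.map String.toList) 0).foldl pvStepA PySem.Dict.empty
    with hD
  -- zeta-reduce both sides; B's pvFlat is definitionally A's pvTranslate
  show (if (List.foldl (fun acc kv => if PySem.Chars.isIn (pvTranslate m.toList) kv.2.2.1 = true
          then acc ++ [kv] else acc) ([] : List pvE) D.items).length = 0 then "(None)"
      else String.ofList (((PySem.List.sorted (PySem.List.sorted
        (List.foldl (fun acc kv => if PySem.Chars.isIn (pvTranslate m.toList) kv.2.2.1 = true
          then acc ++ [kv] else acc) ([] : List pvE) D.items)
        (fun x : pvE => x.2.2.2)) (fun x : pvE => x.2.1) true).headD ([], 0, [], 0)).1))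
    = match List.foldl (fun best kv => if PySem.Chars.isIn (pvTranslate m.toList) kv.2.2.1 = true
          then pvSel best kv else best) (none : Option (Int × Int × List Char)) D.items with
      | none => "(None)"
      | some b => String.ofList b.2.2
  rw [PySem.List.foldl_append_if_eq_filter (fun kv : pvE => PySem.Chars.isIn (pvTranslate m.toList) kv.2.2.1)]
  rw [PySem.List.foldl_if_eq_foldl_filter (fun kv : pvE => PySem.Chars.isIn (pvTranslate m.toList) kv.2.2.1) pvSel]
  simp only [List.nil_append]
  -- order stamps of all dict entries (hence of the matches) are pairwise distinct
  have hinv := pvDictA_inv (musicinfos.map String.toList) 0 PySem.Dict.empty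
    (by simp [PySem.Dict.empty, PySem.Dict.keys]) (by simp [PySem.Dict.empty])
    (by simp [pvOrdsOK, PySem.Dict.empty])
  have hOrds : (D.items.filter (fun kv : pvE => PySem.Chars.isIn (pvTranslate m.toList) kv.2.2.1)).Pairwise
      (fun a c => a.2.2.2 ≠ c.2.2.2) := by
    have hOK := hinv.2
    unfold pvOrdsOK at hOK
    exact List.Pairwise.sublist List.filter_sublist (List.pairwise_map.mp hOK)
  cases hans : D.items.filter (fun kv : pvE => PySem.Chars.isIn (pvTranslate m.toList) kv.2.2.1) with
  | nil => simp
  | cons a rest =>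
    rw [hans] at hOrds
    rw [if_neg (show ¬((a :: rest).length = 0) by simp)]
    -- A side: the head of the double sort
    obtain ⟨h0, t0, hta⟩ : ∃ h0 t0, PySem.List.sorted (a :: rest) (fun x : pvE => x.2.2.2) = h0 :: t0 := by
      cases hcase : PySem.List.sorted (a :: rest) (fun x : pvE => x.2.2.2) with
      | nil => exact absurd (by rwa [PySem.List.sorted_eq_nil_iff] at hcase) (by simp)
      | cons h0 t0 => exact ⟨h0, t0, rfl⟩
    simp only [hta, PySem.List.sorted_rev_eq_foldl_insertBy, List.foldl_cons]
    rw [show PySem.List.insertBy (fun a b : pvE => decide (b.2.1 < a.2.1)) h0 [] = [h0] from rfl]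
    rw [pvFoldIns_head]
    -- properties of A's pick
    have hpw : (h0 :: t0).Pairwise (fun a c : pvE => a.2.2.2 ≤ c.2.2.2) := by
      have hsp := PySem.List.sorted_pairwise (a :: rest) (fun x : pvE => x.2.2.2)
      rwa [hta] at hsp
    obtain ⟨hxh, hpw'⟩ := List.pairwise_cons.mp hpw
    obtain ⟨hAmem, hAle, hAeq, hAall⟩ := pvFoldG_spec t0 h0 hpw' hxh
    set rA := t0.foldl pvG h0 with hrA
    have hperm : (PySem.List.sorted (a :: rest) (fun x : pvE => x.2.2.2)).Perm (a :: rest) :=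
      PySem.List.sorted_perm _ _ _
    rw [hta] at hperm
    have hmemiff : ∀ y : pvE, y ∈ h0 :: t0 ↔ y ∈ a :: rest := fun y => hperm.mem_iff
    have hAmem' : rA ∈ a :: rest := by
      rw [← hmemiff]
      rcases hAmem with h | h
      · rw [h]; exact List.mem_cons_self
      · exact List.mem_cons_of_mem _ h
    have hAopt : ∀ y ∈ a :: rest, y.2.1 ≤ rA.2.1 ∧ (y.2.1 = rA.2.1 → rA.2.2.2 ≤ y.2.2.2) := by
      intro y hy
      rw [← hmemiff] at hy
      rcases List.mem_cons.mp hy with rfl | hy'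
      · exact ⟨hAle, fun h => hAeq h⟩
      · exact hAall y hy'
    -- B side
    rw [show pvSel none a = some (a.2.1, a.2.2.2, a.1) from rfl]
    obtain ⟨rB, hfold, hBmem, hBle, hBeq, hBall⟩ := pvSelFold_spec rest (a.2.1, a.2.2.2, a.1)
    simp only at hBle hBeq
    obtain ⟨e, hemem, hre⟩ : ∃ e ∈ a :: rest, rB = (e.2.1, e.2.2.2, e.1) := by
      rcases hBmem with h | ⟨e, he, hre⟩
      · exact ⟨a, List.mem_cons_self, h⟩
      · exact ⟨e, List.mem_cons_of_mem _ he, hre⟩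
    have hBopt : ∀ y ∈ a :: rest, y.2.1 ≤ rB.1 ∧ (y.2.1 = rB.1 → rB.2.1 ≤ y.2.2.2) := by
      intro y hy
      rcases List.mem_cons.mp hy with rfl | hy'
      · exact ⟨hBle, fun h => hBeq h⟩
      · exact hBall y hy'
    -- the two picks coincide
    have h1 := (hAopt e hemem).1
    have h2 : rA.2.1 ≤ e.2.1 := by
      have := (hBopt rA hAmem').1
      rwa [hre] at this
    have hteq : e.2.1 = rA.2.1 := le_antisymm h1 h2
    have h3 := (hAopt e hemem).2 hteq
    have h4 : e.2.2.2 ≤ rA.2.2.2 := by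
      have := (hBopt rA hAmem').2 (by rw [hre]; exact hteq.symm)
      rwa [hre] at this
    have hordeq : rA.2.2.2 = e.2.2.2 := le_antisymm h3 h4
    have hfin : rA = e := pvOrd_inj (a :: rest) hOrds rA hAmem' e hemem hordeq
    rw [hfold, hre, hfin]
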